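-- pv_equiv track=rewrite | github.com/MrBrantCode/unitest_baseline | mut_generate/mist_train_taco/taco_15598/solution.py | calculate_card_pickup_ways
-- ===== SOURCE A (Python) =====
-- def calculate_card_pickup_ways(test_cases):
--     MOD = 10**9 + 7
--     results = []
--
--     for case in test_cases:
--         N, cards = case
--         cards.sort()
--         ways = 1
--
--         for i in range(N):
--             if i < cards[i]:
--                 ways = 0
--                 break
--             else:
--                 ways *= (i + 1 - cards[i])
--                 ways %= MOD
--
--         results.append(ways)
--
--     return results
-- ===== SOURCE B (Python) =====
-- def calculate_card_pickup_ways(test_cases):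
--     # Counting/run-based: tally card values in a dict, walk the distinct values in
--     # increasing order, and consume each value's run of positions with a rising-
--     # factorial product.  (Return-value equivalent to A; unlike A it does not sort
--     # the cards list in place.)
--     MOD = 10**9 + 7
--     results = []
--     for N, cards in test_cases:
--         cnt = {}
--         for c in cards:
--             cnt[c] = cnt.get(c, 0) + 1
--         ways = 1
--         pos = 0
--         for v in sorted(cnt):
--             if pos >= N:
--                 break
--             if pos < v:
--                 ways = 0
--                 break
--             k = min(cnt[v], N - pos)
--             for t in range(pos + 1 - v, pos + k + 1 - v):
--                 ways = ways * t % MOD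
--             pos += k
--         results.append(ways)
--     return results
-- ===== Notes on version B (the rewrite author's own statement) =====
-- stated objective: alternative
-- what changed: Instead of sorting the cards list and scanning it index by index with a break-on-zero mod-product, B tallies card values into a dict, sorts only the distinct values, and consumes each value's run of positions at once with a rising-factorial product; it does not mutate the input list (A sorts cards in place; equivalence is about the return value).
import Mathlib
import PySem

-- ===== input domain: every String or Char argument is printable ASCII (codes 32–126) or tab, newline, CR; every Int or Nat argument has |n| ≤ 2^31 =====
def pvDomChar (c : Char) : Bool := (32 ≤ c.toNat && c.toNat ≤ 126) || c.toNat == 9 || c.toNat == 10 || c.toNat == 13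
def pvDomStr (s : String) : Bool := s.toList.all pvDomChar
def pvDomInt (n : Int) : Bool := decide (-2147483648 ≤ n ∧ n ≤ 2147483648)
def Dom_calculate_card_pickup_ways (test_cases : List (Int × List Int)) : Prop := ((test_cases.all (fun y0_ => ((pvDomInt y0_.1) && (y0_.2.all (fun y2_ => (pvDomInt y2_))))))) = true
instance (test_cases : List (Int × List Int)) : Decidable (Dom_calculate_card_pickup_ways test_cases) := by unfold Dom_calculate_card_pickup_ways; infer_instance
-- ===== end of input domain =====

-- B replaces A's sort-then-index scan by a value tally (dict) walked over the sorted distinct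
-- values, consuming each run of equal cards with a rising-factorial product; equivalence is
-- about the RETURN value (A sorts each cards list in place, B does not mutate it).

-- ===== PORT A =====
-- the inner 'for i in range(N)' loop of A, with the break returning 0; a none from pyGet? is
-- Python's IndexError (excluded by Pre_; the value returned there is immaterial)
def pvLoopA (cards : List Int) (n : Int) (ways : Int) (i : Int) : Int :=
  if _h : i < n then
    match PySem.List.pyGet? cards i with
    | none => ways
    | some c =>
      if i < c then 0
      else pvLoopA cards n (PySem.Int.mod (ways * (i + 1 - c)) 1000000007) (i + 1)
  else ways
termination_by (n - i).toNat
decreasing_by omega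

def calculate_card_pickup_ways (test_cases : List (Int × List Int)) : List Int :=
  test_cases.foldl
    (fun results case =>
      results ++ [pvLoopA (PySem.List.sorted case.2 (fun x => x) false) case.1 1 0])
    []

-- ===== PORT B =====
-- B's 'for v in sorted(cnt)' loop with its two breaks; cnt[v] is ported as getD v 0 (v is drawn
-- from cnt's keys, so the key is always present and Python's cnt[v] cannot raise); the inner
-- 'for t in range(pos+1-v, pos+k+1-v)' is a fold over that pyRange
def pvKeyLoop (cnt : PySem.Dict Int Int) (n : Int) (keys : List Int) (ways pos : Int) : Int :=
  match keys with
  | [] => ways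
  | v :: rest =>
    if n ≤ pos then ways
    else if pos < v then 0
    else
      let k := min (cnt.getD v 0) (n - pos)
      pvKeyLoop cnt n rest
        ((PySem.List.pyRange (pos + 1 - v) (pos + k + 1 - v) 1).foldl
          (fun w t => PySem.Int.mod (w * t) 1000000007) ways)
        (pos + k)

-- the body of B's outer 'for N, cards in test_cases' loop: build cnt, walk its sorted keys
def pvCaseB (n : Int) (cards : List Int) : Int :=
  let cnt := cards.foldl (fun d c => d.insert c (d.getD c 0 + 1)) PySem.Dict.empty
  pvKeyLoop cnt n (PySem.List.sorted cnt.keys (fun x => x) false) 1 0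

def calculate_card_pickup_ways_alt (test_cases : List (Int × List Int)) : List Int :=
  test_cases.foldl (fun results case => results ++ [pvCaseB case.1 case.2]) []

-- ===== PRECONDITION & SPEC =====
-- Pre_ is exactly where the Python A returns: a case raises IndexError iff N exceeds len(cards)
-- AND no index i < len(cards) of the sorted list violates sorted(cards)[i] ≤ i (a violation stops
-- A's loop with answer 0 before the out-of-range access).
def Pre_calculate_card_pickup_ways (test_cases : List (Int × List Int)) : Prop :=
  ∀ c ∈ test_cases,
    c.1 ≤ (c.2.length : Int) ∨
    ∃ i ∈ List.range c.2.length,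
      (i : Int) < (PySem.List.sorted c.2 (fun x => x) false).getD i 0
instance (test_cases : List (Int × List Int)) : Decidable (Pre_calculate_card_pickup_ways test_cases) := by unfold Pre_calculate_card_pickup_ways; infer_instance

def pvWitness_calculate_card_pickup_ways : (List (Int × List Int)) := [(3, [0, 1, 1]), (2, [2, 0])]

def Spec_calculate_card_pickup_ways (test_cases : List (Int × List Int)) (out : List Int) : Prop := out = calculate_card_pickup_ways_alt test_cases
instance (test_cases : List (Int × List Int)) (out : List Int) : Decidable (Spec_calculate_card_pickup_ways test_cases out) := by unfold Spec_calculate_card_pickup_ways; infer_instance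

-- ===== CLAIM (what is proved, stated in full; the proofs are below) =====
def Claim_equal_calculate_card_pickup_ways : Prop := ∀ (test_cases : List (Int × List Int)), Dom_calculate_card_pickup_ways test_cases → Pre_calculate_card_pickup_ways test_cases → Spec_calculate_card_pickup_ways test_cases (calculate_card_pickup_ways test_cases)

-- ===== LEMMAS AND PROOFS =====

-- equal-to-v cards form a prefix of a sorted list whose minimum is v
lemma pvPrefixLemma (v : Int) :
    ∀ t : List Int, t.Pairwise (· ≤ ·) → (∀ x ∈ t, v ≤ x) →
      t = List.replicate (t.count v) v ++ t.filter (fun x => x ≠ v) := by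
  intro t
  induction t with
  | nil => intro _ _; rfl
  | cons a t ih =>
    intro hp hm
    rcases List.pairwise_cons.mp hp with ⟨ha, hp'⟩
    by_cases hav : a = v
    · subst hav
      have h := ih hp' ha
      calc a :: t = a :: (List.replicate (t.count a) a ++ t.filter (fun x => x ≠ a)) := by
            rw [← h]
        _ = List.replicate ((a :: t).count a) a ++ (a :: t).filter (fun x => x ≠ a) := by
            rw [List.count_cons_self, List.replicate_succ]
            simp
    · have hall : ∀ x ∈ a :: t, x ≠ v := by
        intro x hx
        rcases List.mem_cons.mp hx with rfl | hxt
        · exact hav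
        · have h1 : x ≤ a → v < x → x ≠ v := fun _ h2 => by omega
          have hva : v < a := lt_of_le_of_ne (hm a (List.mem_cons_self)) (fun h => hav h.symm)
          have : a ≤ x := ha x hxt
          omega
      have hc : (a :: t).count v = 0 :=
        List.count_eq_zero.mpr (fun hv => hall v hv rfl)
      rw [hc, List.replicate_zero, List.nil_append,
          List.filter_eq_self.mpr (fun x hx => by simpa using hall x hx)]

-- a sorted list is the concatenation of the runs of its distinct values in increasing order
lemma pvFlatLemma :
    ∀ (ks t : List Int), t.Pairwise (· ≤ ·) → ks.Pairwise (· < ·) →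
      (∀ x, x ∈ t ↔ x ∈ ks) →
      t = ks.flatMap (fun v => List.replicate (t.count v) v) := by
  intro ks
  induction ks with
  | nil =>
    intro t _ _ hmem
    have ht : t = [] :=
      List.eq_nil_iff_forall_not_mem.mpr (fun x hx => by simpa using (hmem x).mp hx)
    simp [ht]
  | cons v rest ih =>
    intro t hts hks hmem
    rcases List.pairwise_cons.mp hks with ⟨hvlt, hks'⟩
    have hmin : ∀ x ∈ t, v ≤ x := by
      intro x hx
      rcases List.mem_cons.mp ((hmem x).mp hx) with rfl | hxr
      · exact le_refl x
      · exact le_of_lt (hvlt x hxr)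
    have hpre := pvPrefixLemma v t hts hmin
    have ht2s : (t.filter (fun x => x ≠ v)).Pairwise (· ≤ ·) := List.Pairwise.filter _ hts
    have hmem2 : ∀ x, x ∈ t.filter (fun x => x ≠ v) ↔ x ∈ rest := by
      intro x
      constructor
      · intro hx
        rcases List.mem_filter.mp hx with ⟨hxt, hxv⟩
        rcases List.mem_cons.mp ((hmem x).mp hxt) with rfl | h
        · simp at hxv
        · exact h
      · intro hx
        refine List.mem_filter.mpr ⟨(hmem x).mpr (List.mem_cons_of_mem _ hx), ?_⟩
        have := hvlt x hx
        simp only [ne_eq, decide_eq_true_eq]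
        omega
    have hih := ih (t.filter (fun x => x ≠ v)) ht2s hks' hmem2
    have hcnt : ∀ w ∈ rest, (t.filter (fun x => x ≠ v)).count w = t.count w := by
      intro w hw
      have hwv : w ≠ v := by have := hvlt w hw; omega
      exact List.count_filter (by simpa using hwv)
    calc t = List.replicate (t.count v) v ++ t.filter (fun x => x ≠ v) := hpre
      _ = List.replicate (t.count v) v
            ++ rest.flatMap (fun w => List.replicate ((t.filter (fun x => x ≠ v)).count w) w) := by
          rw [← hih]
      _ = List.replicate (t.count v) v
            ++ rest.flatMap (fun w => List.replicate (t.count w) w) := by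
          have hmc := List.map_congr_left (l := rest)
            (f := fun w => List.replicate ((t.filter (fun x => x ≠ v)).count w) w)
            (g := fun w => List.replicate (t.count w) w)
            (fun w hw => by simp only [hcnt w hw])
          rw [List.flatMap_def, List.flatMap_def, hmc]
      _ = (v :: rest).flatMap (fun w => List.replicate (t.count w) w) := by
          rw [List.flatMap_cons]

-- A's loop over a constant run of k cards of value v ≤ pos equals the rising-factorial fold
lemma pvRunLemma (s : List Int) (n v : Int) :
    ∀ (k : Nat) (pos ways : Int), v ≤ pos → pos + k ≤ n →
      (∀ j : Nat, j < k → PySem.List.pyGet? s (pos + j) = some v) →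
      pvLoopA s n ways pos
        = pvLoopA s n
            ((PySem.List.pyRange (pos + 1 - v) (pos + (k : Int) + 1 - v) 1).foldl
              (fun w t => PySem.Int.mod (w * t) 1000000007) ways)
            (pos + (k : Int)) := by
  intro k
  induction k with
  | zero =>
    intro pos ways _ _ _
    rw [PySem.List.pyRange_one_eq_nil (by omega)]
    norm_num
  | succ k ih =>
    intro pos ways hv hkn hget
    have hkn' : pos + 1 + (k : Int) ≤ n := by push_cast at hkn; omega
    have h0 : PySem.List.pyGet? s pos = some v := by
      have := hget 0 (Nat.succ_pos k)
      simpa using this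
    have hpos : pos < n := by omega
    have hnv : ¬ pos < v := by omega
    rw [pvLoopA]
    simp only [hpos, dif_pos, h0, hnv, if_false]
    rw [PySem.List.pyRange_one_cons (by push_cast; omega), List.foldl_cons]
    have hih := ih (pos + 1) (PySem.Int.mod (ways * (pos + 1 - v)) 1000000007) (by omega) hkn'
      (fun j hj => by
        have h := hget (j + 1) (by omega)
        have e : pos + ((j + 1 : Nat) : Int) = pos + 1 + (j : Int) := by push_cast; ring
        rw [e] at h
        exact h)
    rw [hih]
    have e1 : pos + 1 + (k : Int) = pos + ((k + 1 : Nat) : Int) := by push_cast; ring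
    have e2 : pos + 1 + 1 - v = pos + 1 - v + 1 := by ring
    rw [e1, e2]

lemma pvKeyLoop_of_ge (cnt : PySem.Dict Int Int) (n : Int) (ks : List Int) (ways pos : Int)
    (h : n ≤ pos) : pvKeyLoop cnt n ks ways pos = ways := by
  cases ks <;> simp [pvKeyLoop, h]

-- A's index loop equals B's key loop whenever the tail of the sorted list from the cursor is
-- exactly the runs of the remaining keys
lemma pvKeyLemma (s : List Int) (cnt : PySem.Dict Int Int) (n : Int) :
    ∀ (ks : List Int) (p : Nat) (ways : Int),
      s.drop p = ks.flatMap (fun v => List.replicate (cnt.getD v 0).toNat v) →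
      (∀ v ∈ ks, 1 ≤ cnt.getD v 0) →
      pvLoopA s n ways (p : Int) = pvKeyLoop cnt n ks ways (p : Int) := by
  intro ks
  induction ks with
  | nil =>
    intro p ways hdrop _
    have hlen : s.length ≤ p := List.drop_eq_nil_iff.mp (by simpa using hdrop)
    have hnone : PySem.List.pyGet? s (p : Int) = none := by
      rw [PySem.List.pyGet?_natCast]
      exact List.getElem?_eq_none hlen
    rw [pvLoopA]
    simp only [pvKeyLoop]
    split_ifs with h
    · simp [hnone]
    · rfl
  | cons v rest ih =>
    intro p ways hdrop hpos1
    have hc1 : 1 ≤ cnt.getD v 0 := hpos1 v List.mem_cons_self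
    have hctn : ((cnt.getD v 0).toNat : Int) = cnt.getD v 0 := Int.toNat_of_nonneg (by omega)
    by_cases hnp : n ≤ (p : Int)
    · rw [pvLoopA]
      simp [pvKeyLoop, show ¬ (p : Int) < n by omega, hnp]
    · rw [not_le] at hnp
      have hget : ∀ j : Nat, j < (cnt.getD v 0).toNat →
          PySem.List.pyGet? s ((p : Int) + (j : Int)) = some v := by
        intro j hj
        have e : (p : Int) + (j : Int) = ((p + j : Nat) : Int) := by push_cast; ring
        rw [e, PySem.List.pyGet?_natCast, ← List.getElem?_drop, hdrop, List.flatMap_cons,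
            List.getElem?_append_left (by simpa using hj)]
        simp [hj]
      by_cases hpv : (p : Int) < v
      · have h0 : PySem.List.pyGet? s (p : Int) = some v := by
          have := hget 0 (by omega)
          simpa using this
        rw [pvLoopA]
        simp [pvKeyLoop, hnp, h0, hpv, show ¬ n ≤ (p : Int) by omega]
      · have hvle : v ≤ (p : Int) := by omega
        by_cases hck : cnt.getD v 0 ≤ n - (p : Int)
        · -- the whole run of v fits below n
          have hkmin : min (cnt.getD v 0) (n - (p : Int)) = cnt.getD v 0 := min_eq_left hck
          have hrun := pvRunLemma s n v (cnt.getD v 0).toNat (p : Int) ways hvle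
            (by rw [hctn]; omega) hget
          rw [hrun, hctn]
          have hdrop' : s.drop (p + (cnt.getD v 0).toNat)
              = rest.flatMap (fun w => List.replicate ((cnt.getD w 0).toNat) w) := by
            rw [← List.drop_drop, hdrop, List.flatMap_cons, List.drop_left' (by simp)]
          have hih := ih (p + (cnt.getD v 0).toNat)
            (List.foldl (fun w t => PySem.Int.mod (w * t) 1000000007) ways
              (PySem.List.pyRange ((p : Int) + 1 - v) ((p : Int) + cnt.getD v 0 + 1 - v)))
            hdrop' (fun w hw => hpos1 w (List.mem_cons_of_mem _ hw))
          have e : ((p + (cnt.getD v 0).toNat : Nat) : Int) = (p : Int) + cnt.getD v 0 := by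
            push_cast [hctn]
            omega
          rw [e] at hih
          rw [hih]
          simp only [pvKeyLoop, show ¬ n ≤ (p : Int) by omega, if_false,
            show ¬ (p : Int) < v by omega, hkmin]
        · -- the run is cut off at n
          rw [not_le] at hck
          have hm0 : 0 ≤ n - (p : Int) := by omega
          have hmc : ((n - (p : Int)).toNat : Int) = n - (p : Int) := Int.toNat_of_nonneg hm0
          have hrun := pvRunLemma s n v (n - (p : Int)).toNat (p : Int) ways hvle
            (by rw [hmc]; omega)
            (fun j hj => hget j (by omega))
          rw [hrun, hmc]
          have e : (p : Int) + (n - (p : Int)) = n := by ring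
          rw [e]
          rw [pvLoopA]
          simp only [lt_irrefl, dite_false]
          have hkmin : min (cnt.getD v 0) (n - (p : Int)) = n - (p : Int) :=
            min_eq_right (by omega)
          simp only [pvKeyLoop, show ¬ n ≤ (p : Int) by omega, if_false,
            show ¬ (p : Int) < v by omega, hkmin]
          rw [show (p : Int) + (n - (p : Int)) = n by ring,
              pvKeyLoop_of_ge _ _ _ _ _ (le_refl n)]

-- per-case equality of the two bodies
lemma pvCase_eq (n : Int) (cs : List Int) :
    pvLoopA (PySem.List.sorted cs (fun x => x) false) n 1 0 = pvCaseB n cs := by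
  simp only [pvCaseB, PySem.Dict.foldl_insert_getD_add_one_eq_counter, PySem.Dict.keys_counter]
  have hsperm := PySem.List.sorted_perm cs (fun x => x) false
  have hss : (PySem.List.sorted cs (fun x => x) false).Pairwise (· ≤ ·) := by
    simpa using PySem.List.sorted_pairwise cs (fun x => x)
  have hkslt : (PySem.List.sorted (PySem.Set.ofList cs) (fun x => x) false).Pairwise (· < ·) :=
    PySem.List.sorted_ofList_pairwise_lt cs
  have hmem : ∀ x, x ∈ PySem.List.sorted cs (fun x => x) false
      ↔ x ∈ PySem.List.sorted (PySem.Set.ofList cs) (fun x => x) false := by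
    intro x
    rw [PySem.List.mem_sorted, PySem.List.mem_sorted, PySem.Set.mem_ofList]
  have hflat := pvFlatLemma (PySem.List.sorted (PySem.Set.ofList cs) (fun x => x) false)
    (PySem.List.sorted cs (fun x => x) false) hss hkslt hmem
  have hcount : ∀ w, ((PySem.Dict.counter cs).getD w 0).toNat
      = (PySem.List.sorted cs (fun x => x) false).count w := by
    intro w
    rw [PySem.Dict.getD_counter, Int.toNat_natCast, hsperm.count_eq]
  have hdrop : (PySem.List.sorted cs (fun x => x) false).drop 0
      = (PySem.List.sorted (PySem.Set.ofList cs) (fun x => x) false).flatMap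
          (fun w => List.replicate (((PySem.Dict.counter cs).getD w 0).toNat) w) := by
    rw [List.drop_zero, hflat, List.flatMap_def, List.flatMap_def]
    congr 1
    exact List.map_congr_left (fun w _ => by rw [hcount w])
  have hpos1 : ∀ w ∈ PySem.List.sorted (PySem.Set.ofList cs) (fun x => x) false,
      1 ≤ (PySem.Dict.counter cs).getD w 0 := by
    intro w hw
    have hwcs : w ∈ cs := by
      have := ((hmem w).mpr hw)
      rwa [PySem.List.mem_sorted] at this
    rw [PySem.Dict.getD_counter]
    have := List.count_pos_iff.mpr hwcs
    omega
  have h := pvKeyLemma (PySem.List.sorted cs (fun x => x) false) (PySem.Dict.counter cs) n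
    (PySem.List.sorted (PySem.Set.ofList cs) (fun x => x) false) 0 1 hdrop hpos1
  simpa using h

-- the two folds agree from any common accumulator
lemma pvFold_eq (tcs : List (Int × List Int)) :
    ∀ acc : List Int,
      tcs.foldl
        (fun results case =>
          results ++ [pvLoopA (PySem.List.sorted case.2 (fun x => x) false) case.1 1 0]) acc
      = tcs.foldl (fun results case => results ++ [pvCaseB case.1 case.2]) acc := by
  induction tcs with
  | nil => intro acc; rfl
  | cons c rest ih =>
    intro acc
    simp only [List.foldl_cons]
    rw [pvCase_eq c.1 c.2]
    exact ih _

-- ===== VERDICT (by name: the statement is the Claim_ definition above) =====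
theorem calculate_card_pickup_ways_spec : Claim_equal_calculate_card_pickup_ways := by
  intro test_cases _ _
  unfold Spec_calculate_card_pickup_ways calculate_card_pickup_ways calculate_card_pickup_ways_alt
  exact pvFold_eq test_cases []
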